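-- pv_equiv track=rewrite | github.com/eldar-verdi/2048_game | 2048.py | isFullyShifted
-- ===== SOURCE A (Python) =====
-- def isFullyShifted(row):
--     nonZeroEncountered = False;
--     for i in row:
--         if (i != 0):
--             nonZeroEncountered = True;
--         if (i == 0):
--             if (nonZeroEncountered):
--                 return False;
--     return True;
-- ===== SOURCE B (Python) =====
-- def isFullyShifted(row):
--     idx = next((k for k, v in enumerate(row) if v != 0), None)
--     if idx is None:
--         return True
--     return 0 not in row[idx:]
-- ===== Notes on version B (the rewrite author's own statement) =====
-- stated objective: alternative
-- what changed: Replaces A's single flag-tracking pass with a two-phase scan: find the index of the first nonzero element, then check the suffix from that index for membership of 0.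
import Mathlib
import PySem

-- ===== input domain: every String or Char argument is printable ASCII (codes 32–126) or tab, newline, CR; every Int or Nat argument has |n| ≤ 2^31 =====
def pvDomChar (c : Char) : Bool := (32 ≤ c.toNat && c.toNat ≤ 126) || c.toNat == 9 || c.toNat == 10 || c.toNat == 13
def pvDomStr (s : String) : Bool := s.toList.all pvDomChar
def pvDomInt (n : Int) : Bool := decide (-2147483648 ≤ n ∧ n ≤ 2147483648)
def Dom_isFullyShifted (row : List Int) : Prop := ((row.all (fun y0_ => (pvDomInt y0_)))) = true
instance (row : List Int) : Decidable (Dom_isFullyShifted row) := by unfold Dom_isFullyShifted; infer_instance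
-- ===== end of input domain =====

-- B: two-phase scan (find first nonzero index, then check the suffix for a zero) instead of A's flag-tracking loop; same O(n) cost.
-- ===== PORT A =====
-- the Python for-loop with its nonZeroEncountered flag and early return False
def isFullyShiftedGo (nonZeroEncountered : Bool) : List Int → Bool
  | [] => true
  | i :: rest =>
    let nz := if i ≠ 0 then true else nonZeroEncountered
    if i = 0 then
      (if nz then false else isFullyShiftedGo nz rest)
    else isFullyShiftedGo nz rest

def isFullyShifted (row : List Int) : Bool := isFullyShiftedGo false row

-- ===== PORT B =====
-- Source B: idx = first index with v != 0 (None → True); then `0 not in row[idx:]`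
def isFullyShifted_alt (row : List Int) : Bool :=
  match List.findIdx? (fun v => v ≠ 0) row with
  | none => true
  | some idx => !((row.drop idx).contains 0)

-- ===== PRECONDITION & SPEC =====
def Spec_isFullyShifted (row : List Int) (out : Bool) : Prop := out = isFullyShifted_alt row
instance (row : List Int) (out : Bool) : Decidable (Spec_isFullyShifted row out) := by unfold Spec_isFullyShifted; infer_instance

-- ===== CLAIM (what is proved, stated in full; the proofs are below) =====
def Claim_equal_isFullyShifted : Prop := ∀ (row : List Int), Dom_isFullyShifted row → Spec_isFullyShifted row (isFullyShifted row)

-- ===== LEMMAS AND PROOFS =====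

-- ===== VERDICT (by name: the statement is the Claim_ definition above) =====
-- once the flag is set, A returns true iff no zero remains
theorem goA_true (l : List Int) : isFullyShiftedGo true l = !(l.contains 0) := by
  induction l with
  | nil => rfl
  | cons i rest ih =>
    by_cases h : i = 0
    · simp [isFullyShiftedGo, h]
    · simp [isFullyShiftedGo, h, ih]
      exact fun _ he => h (Eq.symm he)

theorem goA_eq_alt (l : List Int) : isFullyShiftedGo false l = isFullyShifted_alt l := by
  induction l with
  | nil => rfl
  | cons i rest ih =>
    by_cases h : i = 0
    · subst h
      have hgo : isFullyShiftedGo false (0 :: rest) = isFullyShiftedGo false rest := by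
        simp [isFullyShiftedGo]
      rw [hgo, ih]
      simp only [isFullyShifted_alt, List.findIdx?_cons]
      cases hf : List.findIdx? (fun v => v ≠ 0) rest <;> simp
    · simp only [isFullyShiftedGo, if_neg h]
      simp [h, goA_true, isFullyShifted_alt, List.findIdx?_cons]
      exact fun _ he => h (Eq.symm he)

theorem isFullyShifted_spec : Claim_equal_isFullyShifted := by
  intro row _
  unfold Spec_isFullyShifted isFullyShifted
  exact goA_eq_alt row
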